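-- pv_equiv track=rewrite | github.com/GrantLudwig/Chess_AI | main.py | blocked
-- ===== SOURCE A (Python) =====
-- def blocked(checkedPieces, move, kingPos): #determines if a piece can "block" a check
--     rKing, cKing = kingPos
--     rMove, cMove = move
--     for pos in checkedPieces:
--         checkedR, checkedC = pos
--         #hor
--         if checkedR == rKing and rMove == checkedR:
--             if checkedC < cKing and cMove < cKing and cMove > checkedC:
--                 return True
--             elif checkedC > cKing and cMove > cKing and cMove < checkedC:
--                 return True
--         #vert
--         if checkedC == cKing and cMove == checkedC:
--             if checkedR < rKing and rMove < rKing and rMove > checkedR: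
--                 return True
--             elif checkedR > rKing and rMove > rKing and rMove < checkedR:
--                 return True
--         diagList = []
--         #diag
--         #up left
--         for row, col in zip(range(rKing - 1, checkedR, -1), range(cKing - 1, checkedC, -1)):
--             if col >= 0 and col < 8 and row >= 0 and row < 8:
--                 diagList.append((row, col))
--         #up right
--         for row, col in zip(range(rKing - 1, checkedR, -1), range(cKing + 1, checkedC, 1)):
--             if col >= 0 and col < 8 and row >= 0 and row < 8:
--                 diagList.append((row, col))
--         #down left
--         for row, col in zip(range(rKing + 1, checkedR, 1), range(cKing - 1, checkedC, -1)):
--             if col >= 0 and col < 8 and row >= 0 and row < 8: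
--                 diagList.append((row, col))
--         #down right
--         for row, col in zip(range(rKing + 1, checkedR, 1), range(cKing + 1, checkedC, 1)):
--             if col >= 0 and col < 8 and row >= 0 and row < 8:
--                 diagList.append((row, col))
--         if move in diagList:
--             return True
--     return False
-- ===== SOURCE B (Python) =====
-- def blocked(checkedPieces, move, kingPos):  # same result as A, by direct arithmetic instead of enumerating diagonal squares
--     rKing, cKing = kingPos
--     rMove, cMove = move
--
--     def between(x, a, b):  # strictly between a and b, in either order
--         return a < x < b or b < x < a
--
--     for checkedR, checkedC in checkedPieces:
--         # horizontal block
--         if checkedR == rKing and rMove == checkedR and between(cMove, checkedC, cKing):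
--             return True
--         # vertical block
--         if checkedC == cKing and cMove == checkedC and between(rMove, checkedR, rKing):
--             return True
--         # diagonal block: on a diagonal through the king, strictly between king and
--         # checked piece on both coordinates, and on the board
--         if (abs(rMove - rKing) == abs(cMove - cKing) != 0
--                 and between(rMove, checkedR, rKing)
--                 and between(cMove, checkedC, cKing)
--                 and 0 <= rMove < 8 and 0 <= cMove < 8):
--             return True
--     return False
-- ===== Notes on version B (the rewrite author's own statement) =====
-- stated objective: simpler
-- what changed: B replaces A's four diagonal-square enumeration loops (zip of ranges appended into diagList) and the list-membership test with one direct arithmetic condition: equal row/column offset magnitudes from the king, the move strictly between king and checked piece on both coordinates, and on the board.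
import Mathlib
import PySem

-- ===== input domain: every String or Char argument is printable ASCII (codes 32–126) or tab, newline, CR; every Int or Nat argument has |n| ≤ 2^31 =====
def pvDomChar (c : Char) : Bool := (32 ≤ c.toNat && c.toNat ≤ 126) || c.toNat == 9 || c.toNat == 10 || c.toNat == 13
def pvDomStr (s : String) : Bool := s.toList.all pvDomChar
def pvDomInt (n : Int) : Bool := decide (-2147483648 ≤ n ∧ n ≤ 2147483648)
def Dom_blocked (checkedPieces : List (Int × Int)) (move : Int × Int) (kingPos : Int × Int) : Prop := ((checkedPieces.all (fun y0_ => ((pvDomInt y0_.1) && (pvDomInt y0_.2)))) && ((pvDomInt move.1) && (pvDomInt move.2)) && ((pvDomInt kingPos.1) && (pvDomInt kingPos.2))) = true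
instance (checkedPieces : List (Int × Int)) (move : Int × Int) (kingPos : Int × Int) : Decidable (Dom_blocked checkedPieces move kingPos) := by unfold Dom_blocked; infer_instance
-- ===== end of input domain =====

-- B replaces A's four diagonal-square enumeration loops and list-membership test by one
-- direct arithmetic condition on the move's offsets from the king (objective: simpler).

-- ===== PORT A =====
-- one `for row, col in zip(...): if in-bounds: diagList.append(...)` loop of A
def pvInBounds (p : Int × Int) : Bool := decide (0 ≤ p.2 ∧ p.2 < 8 ∧ 0 ≤ p.1 ∧ p.1 < 8)

-- `diagList.append(...)` is ported as cons onto a reversed accumulator with one final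
-- `reverse` in pvDiagList (the same list value, built in linear instead of quadratic time)
def pvDiagAppend (diagList : List (Int × Int)) (pairs : List (Int × Int)) : List (Int × Int) :=
  pairs.foldl (fun acc p => if pvInBounds p then p :: acc else acc) diagList

-- Python's zip(range(a,b,step), range(c,d,step')) is LAZY: it materializes only the common
-- (min) length.  These four helpers port it by hand, one per step-sign combination; they are
-- exact: pvZipDD_eq/pvZipDU_eq/pvZipUD_eq/pvZipUU_eq below prove each equals
-- List.zip (pyRange a b ·) (pyRange c d ·).
def pvZipDD (a b c d : Int) : List (Int × Int) :=
  (List.range (min (a - b).toNat (c - d).toNat)).map (fun (k : Nat) => (a - (k : Int), c - (k : Int)))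
def pvZipDU (a b c d : Int) : List (Int × Int) :=
  (List.range (min (a - b).toNat (d - c).toNat)).map (fun (k : Nat) => (a - (k : Int), c + (k : Int)))
def pvZipUD (a b c d : Int) : List (Int × Int) :=
  (List.range (min (b - a).toNat (c - d).toNat)).map (fun (k : Nat) => (a + (k : Int), c - (k : Int)))
def pvZipUU (a b c d : Int) : List (Int × Int) :=
  (List.range (min (b - a).toNat (d - c).toNat)).map (fun (k : Nat) => (a + (k : Int), c + (k : Int)))

-- diagList after the four diagonal loops of A's body
def pvDiagList (rKing cKing checkedR checkedC : Int) : List (Int × Int) :=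
  let d1 := pvDiagAppend [] (pvZipDD (rKing - 1) checkedR (cKing - 1) checkedC)
  let d2 := pvDiagAppend d1 (pvZipDU (rKing - 1) checkedR (cKing + 1) checkedC)
  let d3 := pvDiagAppend d2 (pvZipUD (rKing + 1) checkedR (cKing - 1) checkedC)
  (pvDiagAppend d3 (pvZipUU (rKing + 1) checkedR (cKing + 1) checkedC)).reverse

-- A's `for pos in checkedPieces` loop with its early `return True`s
def pvBlockedLoop (rKing cKing rMove cMove : Int) : List (Int × Int) → Bool
  | [] => false
  | (checkedR, checkedC) :: rest =>
    if checkedR = rKing ∧ rMove = checkedR ∧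
        ((checkedC < cKing ∧ cMove < cKing ∧ cMove > checkedC) ∨
         (checkedC > cKing ∧ cMove > cKing ∧ cMove < checkedC)) then true
    else if checkedC = cKing ∧ cMove = checkedC ∧
        ((checkedR < rKing ∧ rMove < rKing ∧ rMove > checkedR) ∨
         (checkedR > rKing ∧ rMove > rKing ∧ rMove < checkedR)) then true
    else if (rMove, cMove) ∈ pvDiagList rKing cKing checkedR checkedC then true
    else pvBlockedLoop rKing cKing rMove cMove rest

def blocked (checkedPieces : List (Int × Int)) (move : Int × Int) (kingPos : Int × Int) : Bool :=
  pvBlockedLoop kingPos.1 kingPos.2 move.1 move.2 checkedPieces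

-- ===== PORT B =====
-- strictly between a and b, in either order
def pvBetween (x a b : Int) : Bool := decide ((a < x ∧ x < b) ∨ (b < x ∧ x < a))

def pvBlockedAltLoop (rKing cKing rMove cMove : Int) : List (Int × Int) → Bool
  | [] => false
  | (checkedR, checkedC) :: rest =>
    if checkedR = rKing ∧ rMove = checkedR ∧ pvBetween cMove checkedC cKing = true then true
    else if checkedC = cKing ∧ cMove = checkedC ∧ pvBetween rMove checkedR rKing = true then true
    else if (rMove - rKing).natAbs = (cMove - cKing).natAbs ∧ (cMove - cKing).natAbs ≠ 0 ∧
        pvBetween rMove checkedR rKing = true ∧ pvBetween cMove checkedC cKing = true ∧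
        0 ≤ rMove ∧ rMove < 8 ∧ 0 ≤ cMove ∧ cMove < 8 then true
    else pvBlockedAltLoop rKing cKing rMove cMove rest

def blocked_alt (checkedPieces : List (Int × Int)) (move : Int × Int) (kingPos : Int × Int) : Bool :=
  pvBlockedAltLoop kingPos.1 kingPos.2 move.1 move.2 checkedPieces

-- ===== PRECONDITION & SPEC =====
def Spec_blocked (checkedPieces : List (Int × Int)) (move : Int × Int) (kingPos : Int × Int) (out : Bool) : Prop := out = blocked_alt checkedPieces move kingPos
instance (checkedPieces : List (Int × Int)) (move : Int × Int) (kingPos : Int × Int) (out : Bool) : Decidable (Spec_blocked checkedPieces move kingPos out) := by unfold Spec_blocked; infer_instance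

-- ===== CLAIM (what is proved, stated in full; the proofs are below) =====
def Claim_equal_blocked : Prop := ∀ (checkedPieces : List (Int × Int)) (move : Int × Int) (kingPos : Int × Int), Dom_blocked checkedPieces move kingPos → Spec_blocked checkedPieces move kingPos (blocked checkedPieces move kingPos)

-- ===== LEMMAS AND PROOFS =====

theorem pv_zip_range_range (n m : Nat) :
    List.zip (List.range n) (List.range m) = (List.range (min n m)).map (fun i => (i, i)) := by
  apply List.ext_getElem
  · simp
  · intro i h1 h2
    simp [List.getElem_zip]

theorem pv_mem_zip_maps (f g : Nat → Int) (n m : Nat) (x y : Int) :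
    ((x, y) ∈ List.zip ((List.range n).map f) ((List.range m).map g)) ↔
      ∃ i : Nat, i < n ∧ i < m ∧ f i = x ∧ g i = y := by
  rw [List.zip_map, pv_zip_range_range]
  simp only [List.map_map, List.mem_map, List.mem_range, Function.comp, Prod.map, Prod.mk.injEq]
  constructor
  · rintro ⟨i, hi, hx, hy⟩; exact ⟨i, by omega, by omega, hx, hy⟩
  · rintro ⟨i, h1, h2, hx, hy⟩; exact ⟨i, by omega, hx, hy⟩

theorem pv_mem_diagAppend (acc pairs : List (Int × Int)) (q : Int × Int) :
    (q ∈ pvDiagAppend acc pairs) ↔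
      q ∈ acc ∨ (q ∈ pairs ∧ (0 ≤ q.2 ∧ q.2 < 8 ∧ 0 ≤ q.1 ∧ q.1 < 8)) := by
  induction pairs generalizing acc with
  | nil => simp [pvDiagAppend]
  | cons p ps ih =>
    simp only [pvDiagAppend] at *
    rw [List.foldl_cons]
    by_cases h : pvInBounds p = true
    · simp only [h, if_true, ih, List.mem_cons]
      simp only [pvInBounds, decide_eq_true_eq] at h
      constructor
      · rintro ((rfl | hq) | ⟨hq, hb⟩)
        · exact Or.inr ⟨Or.inl rfl, h⟩
        · exact Or.inl hq
        · exact Or.inr ⟨Or.inr hq, hb⟩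
      · rintro (hq | ⟨(rfl | hm), hb⟩)
        · exact Or.inl (Or.inr hq)
        · exact Or.inl (Or.inl rfl)
        · exact Or.inr ⟨hm, hb⟩
    · simp only [h, ih, List.mem_cons]
      simp only [pvInBounds, decide_eq_true_eq] at h
      constructor
      · rintro (hq | ⟨hm, hb⟩)
        · exact Or.inl hq
        · exact Or.inr ⟨Or.inr hm, hb⟩
      · rintro (hq | ⟨(rfl | hm), hb⟩)
        · exact Or.inl hq
        · exact absurd hb h
        · exact Or.inr ⟨hm, hb⟩

theorem pv_zip_maps_eq (f g : Nat → Int) (n m : Nat) :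
    List.zip ((List.range n).map f) ((List.range m).map g) =
      (List.range (min n m)).map (fun i => (f i, g i)) := by
  rw [List.zip_map, pv_zip_range_range]
  simp [List.map_map, Function.comp, Prod.map]

theorem pvZipDD_eq (a b c d : Int) :
    pvZipDD a b c d = List.zip (PySem.List.pyRange a b (-1)) (PySem.List.pyRange c d (-1)) := by
  unfold pvZipDD
  rw [PySem.List.pyRange_neg_one, PySem.List.pyRange_neg_one, pv_zip_maps_eq]

theorem pvZipDU_eq (a b c d : Int) :
    pvZipDU a b c d = List.zip (PySem.List.pyRange a b (-1)) (PySem.List.pyRange c d 1) := by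
  unfold pvZipDU
  rw [PySem.List.pyRange_neg_one, PySem.List.pyRange_one, pv_zip_maps_eq]

theorem pvZipUD_eq (a b c d : Int) :
    pvZipUD a b c d = List.zip (PySem.List.pyRange a b 1) (PySem.List.pyRange c d (-1)) := by
  unfold pvZipUD
  rw [PySem.List.pyRange_one, PySem.List.pyRange_neg_one, pv_zip_maps_eq]

theorem pvZipUU_eq (a b c d : Int) :
    pvZipUU a b c d = List.zip (PySem.List.pyRange a b 1) (PySem.List.pyRange c d 1) := by
  unfold pvZipUU
  rw [PySem.List.pyRange_one, PySem.List.pyRange_one, pv_zip_maps_eq]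

theorem pv_mem_diagList (rKing cKing checkedR checkedC rMove cMove : Int) :
    ((rMove, cMove) ∈ pvDiagList rKing cKing checkedR checkedC) ↔
      ((rMove - rKing).natAbs = (cMove - cKing).natAbs ∧ (cMove - cKing).natAbs ≠ 0 ∧
        ((checkedR < rMove ∧ rMove < rKing) ∨ (rKing < rMove ∧ rMove < checkedR)) ∧
        ((checkedC < cMove ∧ cMove < cKing) ∨ (cKing < cMove ∧ cMove < checkedC)) ∧
        0 ≤ rMove ∧ rMove < 8 ∧ 0 ≤ cMove ∧ cMove < 8) := by
  unfold pvDiagList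
  simp only [pvZipDD_eq, pvZipDU_eq, pvZipUD_eq, pvZipUU_eq, List.mem_reverse]
  simp only [pv_mem_diagAppend, PySem.List.pyRange_one, PySem.List.pyRange_neg_one,
    pv_mem_zip_maps, List.not_mem_nil, false_or]
  constructor
  · rintro (((⟨⟨i, h1, h2, hx, hy⟩, hb⟩ | ⟨⟨i, h1, h2, hx, hy⟩, hb⟩) | ⟨⟨i, h1, h2, hx, hy⟩, hb⟩) | ⟨⟨i, h1, h2, hx, hy⟩, hb⟩) <;> omega
  · rintro ⟨habs, hne, hr | hr, hc | hc, hb⟩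
    · exact Or.inl (Or.inl (Or.inl ⟨⟨(rKing - 1 - rMove).toNat, by omega, by omega, by omega⟩, by omega⟩))
    · exact Or.inl (Or.inl (Or.inr ⟨⟨(rKing - 1 - rMove).toNat, by omega, by omega, by omega⟩, by omega⟩))
    · exact Or.inl (Or.inr ⟨⟨(rMove - rKing - 1).toNat, by omega, by omega, by omega⟩, by omega⟩)
    · exact Or.inr ⟨⟨(rMove - rKing - 1).toNat, by omega, by omega, by omega⟩, by omega⟩

theorem pv_loop_eq (rKing cKing rMove cMove : Int) (l : List (Int × Int)) :
    pvBlockedLoop rKing cKing rMove cMove l = pvBlockedAltLoop rKing cKing rMove cMove l := by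
  induction l with
  | nil => rfl
  | cons p rest ih =>
    obtain ⟨checkedR, checkedC⟩ := p
    simp only [pvBlockedLoop, pvBlockedAltLoop]
    have h1 : (checkedR = rKing ∧ rMove = checkedR ∧
        ((checkedC < cKing ∧ cMove < cKing ∧ cMove > checkedC) ∨
         (checkedC > cKing ∧ cMove > cKing ∧ cMove < checkedC))) ↔
        (checkedR = rKing ∧ rMove = checkedR ∧ pvBetween cMove checkedC cKing = true) := by
      simp only [pvBetween, decide_eq_true_eq]; omega
    have h2 : (checkedC = cKing ∧ cMove = checkedC ∧
        ((checkedR < rKing ∧ rMove < rKing ∧ rMove > checkedR) ∨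
         (checkedR > rKing ∧ rMove > rKing ∧ rMove < checkedR))) ↔
        (checkedC = cKing ∧ cMove = checkedC ∧ pvBetween rMove checkedR rKing = true) := by
      simp only [pvBetween, decide_eq_true_eq]; omega
    have h3 : ((rMove, cMove) ∈ pvDiagList rKing cKing checkedR checkedC) ↔
        ((rMove - rKing).natAbs = (cMove - cKing).natAbs ∧ (cMove - cKing).natAbs ≠ 0 ∧
          pvBetween rMove checkedR rKing = true ∧ pvBetween cMove checkedC cKing = true ∧
          0 ≤ rMove ∧ rMove < 8 ∧ 0 ≤ cMove ∧ cMove < 8) := by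
      rw [pv_mem_diagList]; simp only [pvBetween, decide_eq_true_eq]
    rw [if_congr h1 rfl (if_congr h2 rfl (if_congr h3 rfl ih))]

-- ===== VERDICT (by name: the statement is the Claim_ definition above) =====
theorem blocked_spec : Claim_equal_blocked := by
  intro checkedPieces move kingPos _
  unfold Spec_blocked blocked blocked_alt
  exact pv_loop_eq _ _ _ _ _
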